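-- pv_equiv track=rewrite | github.com/djdillybdev/themectl | themectl_py/roles.py | resolve_role_hex
-- ===== SOURCE A (Python) =====
-- def _is_hex(v: str) -> bool:
--     if not isinstance(v, str) or len(v) != 7 or not v.startswith("#"):
--         return False
--     return all(c in "0123456789abcdefABCDEF" for c in v[1:])
--
-- def resolve_role_hex(role_key: str, resolved_roles: dict[str, str], colors: dict[str, str], depth: int = 0) -> str | None:
--     if depth > 16:
--         return None
--     value = resolved_roles.get(role_key)
--     if not value:
--         aliases = {
--             "i3.focused_border": "ui.focus.focused_border",
--             "i3.unfocused_border": "ui.focus.unfocused_border",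
--             "i3.focused_inactive_border": "ui.focus.inactive_border",
--         }
--         alias = aliases.get(role_key)
--         if alias:
--             value = resolved_roles.get(alias)
--     if not value:
--         return None
--     if _is_hex(value):
--         return value.lower()
--     if value in colors:
--         return colors[value].lower()
--     if value in resolved_roles:
--         return resolve_role_hex(value, resolved_roles, colors, depth + 1)
--     return None
-- ===== SOURCE B (Python) =====
-- _ALIASES = {
--     "i3.focused_border": "ui.focus.focused_border",
--     "i3.unfocused_border": "ui.focus.unfocused_border",
--     "i3.focused_inactive_border": "ui.focus.inactive_border",
-- }
--
-- _HEX_DIGITS = "0123456789abcdefABCDEF"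
--
--
-- def resolve_role_hex(role_key: str, resolved_roles: dict, colors: dict, depth: int = 0):
--     key, d = role_key, depth
--     while d <= 16:
--         value = resolved_roles.get(key)
--         if not value and key in _ALIASES:
--             value = resolved_roles.get(_ALIASES[key])
--         if not value:
--             return None
--         if len(value) == 7 and value[0] == "#" and all(c in _HEX_DIGITS for c in value[1:]):
--             return value.lower()
--         hexv = colors.get(value)
--         if hexv is not None:
--             return hexv.lower()
--         if value not in resolved_roles:
--             return None
--         key, d = value, d + 1
--     return None
-- ===== Notes on version B (the rewrite author's own statement) =====
-- stated objective: idiomatic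
-- what changed: Replaces the depth-passing recursion with an explicit while loop over a local (key, depth) state, an inline hex-literal test instead of the _is_hex helper, and a single colors.get instead of the membership-test-then-index pair.
import Mathlib
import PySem

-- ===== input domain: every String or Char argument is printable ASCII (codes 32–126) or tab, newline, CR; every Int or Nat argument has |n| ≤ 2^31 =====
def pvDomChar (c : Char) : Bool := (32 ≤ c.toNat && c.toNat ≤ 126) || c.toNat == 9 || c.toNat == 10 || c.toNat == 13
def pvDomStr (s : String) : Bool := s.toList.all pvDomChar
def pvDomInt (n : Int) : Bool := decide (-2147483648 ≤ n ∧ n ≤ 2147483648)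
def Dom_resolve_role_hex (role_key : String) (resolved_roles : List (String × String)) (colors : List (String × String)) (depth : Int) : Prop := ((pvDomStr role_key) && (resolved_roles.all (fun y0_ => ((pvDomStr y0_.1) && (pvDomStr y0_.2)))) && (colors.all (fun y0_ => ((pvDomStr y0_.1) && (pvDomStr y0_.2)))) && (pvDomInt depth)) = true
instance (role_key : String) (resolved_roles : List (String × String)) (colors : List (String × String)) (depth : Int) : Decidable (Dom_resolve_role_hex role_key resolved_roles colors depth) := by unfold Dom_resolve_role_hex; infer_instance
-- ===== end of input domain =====

-- B replaces A's depth-passing recursion by an explicit while loop over a local (key, depth)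
-- state, with an inline hex test and a single colors.get instead of membership-then-index.
-- ===== PORT A =====
-- port of _is_hex (v is always a str here; `c in "0123…"` on a single char is char membership — exact)
def pvIsHexA (v : String) : Bool :=
  if PySem.Str.len v ≠ 7 || !(PySem.Str.startswith v "#") then false
  else (PySem.Str.slice v (some 1) none).toList.all
    (fun c => "0123456789abcdefABCDEF".toList.contains c)

def resolve_role_hex (role_key : String) (resolved_roles : List (String × String)) (colors : List (String × String)) (depth : Int) : Option String :=
  if depth > 16 then none
  else
    let rrD := PySem.Dict.mk resolved_roles
    let value0 := rrD.get? role_key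
    -- the `aliases` dict literal
    let aliases := PySem.Dict.mk [("i3.focused_border", "ui.focus.focused_border"), ("i3.unfocused_border", "ui.focus.unfocused_border"), ("i3.focused_inactive_border", "ui.focus.inactive_border")]
    -- `if not value:` — value is None or the empty string
    let value1 := if value0 == none || value0 == some "" then
        match aliases.get? role_key with            -- alias = aliases.get(role_key)
        | some al => if al == "" then value0 else rrD.get? al   -- if alias: value = …
        | none => value0
      else value0
    match value1 with
    | none => none                                   -- if not value: return None
    | some v =>
      if v == "" then none                           -- (the other falsy case)
      else if pvIsHexA v then some (PySem.Str.lower v)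
      else if (PySem.Dict.mk colors).contains v then
        match (PySem.Dict.mk colors).get? v with     -- colors[value] (present by the guard)
        | some c => some (PySem.Str.lower c)
        | none => none
      else if rrD.contains v then
        resolve_role_hex v resolved_roles colors (depth + 1)
      else none
termination_by (17 - depth).toNat
decreasing_by omega

-- ===== PORT B =====
-- Source B's inline hex test on the code points (value[0] is guarded by the length test; value[1:] = drop 1 — exact)
def pvIsHexB (v : List Char) : Bool :=
  v.length == 7 && v[0]? == some '#' &&
    (v.drop 1).all (fun c => "0123456789abcdefABCDEF".toList.contains c)

-- the while loop of Source B; `fuel` bounds the iterations (the `d > 16` guard always fires first)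
def pvLoopB (resolved_roles : List (String × String)) (colors : List (String × String)) : Nat → String → Int → Option String
  | 0, _, _ => none
  | fuel + 1, key, d =>
    if d > 16 then none
    else
      let rrD := PySem.Dict.mk resolved_roles
      let aliases := PySem.Dict.mk [("i3.focused_border", "ui.focus.focused_border"), ("i3.unfocused_border", "ui.focus.unfocused_border"), ("i3.focused_inactive_border", "ui.focus.inactive_border")]
      let v0 := rrD.get? key
      -- if not value and key in _ALIASES: value = resolved_roles.get(_ALIASES[key])
      let v1 := if (v0 == none || v0 == some "") && aliases.contains key then rrD.get? (aliases.getD key "") else v0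
      match v1 with
      | none => none
      | some v =>
        if v == "" then none
        else if pvIsHexB v.toList then some (PySem.Str.lower v)
        else match (PySem.Dict.mk colors).get? v with  -- hexv = colors.get(value)
          | some c => some (PySem.Str.lower c)
          | none =>
            if rrD.contains v then pvLoopB resolved_roles colors fuel v (d + 1)
            else none

def resolve_role_hex_alt (role_key : String) (resolved_roles : List (String × String)) (colors : List (String × String)) (depth : Int) : Option String :=
  pvLoopB resolved_roles colors ((17 - depth).toNat + 1) role_key depth

-- ===== PRECONDITION & SPEC =====
def Spec_resolve_role_hex (role_key : String) (resolved_roles : List (String × String)) (colors : List (String × String)) (depth : Int) (out : Option String) : Prop := out = resolve_role_hex_alt role_key resolved_roles colors depth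
instance (role_key : String) (resolved_roles : List (String × String)) (colors : List (String × String)) (depth : Int) (out : Option String) : Decidable (Spec_resolve_role_hex role_key resolved_roles colors depth out) := by unfold Spec_resolve_role_hex; infer_instance

-- ===== CLAIM (what is proved, stated in full; the proofs are below) =====
def Claim_equal_resolve_role_hex : Prop := ∀ (role_key : String) (resolved_roles : List (String × String)) (colors : List (String × String)) (depth : Int), Dom_resolve_role_hex role_key resolved_roles colors depth → Spec_resolve_role_hex role_key resolved_roles colors depth (resolve_role_hex role_key resolved_roles colors depth)

-- ===== LEMMAS AND PROOFS =====
lemma pvHexList (l : List Char) :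
    (if (decide ((l.length : Int) ≠ 7) || !PySem.Chars.startswith l "#".toList) = true then false
      else l.tail.all fun c => "0123456789abcdefABCDEF".toList.contains c) =
    (l.length == 7 && l[0]? == some '#' && (List.drop 1 l).all fun c => "0123456789abcdefABCDEF".toList.contains c) := by
  cases l with
  | nil => simp
  | cons c t =>
    have hlen : ((t.length : Int) + 1 = 7) ↔ t.length = 6 := by omega
    by_cases hc : '#' = c
    · subst hc
      by_cases hl : t.length = 6 <;>
        simp_all [PySem.Chars.startswith, List.isPrefixOf]
    · have hc2 : ¬ c = '#' := fun h => hc h.symm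
      simp_all [PySem.Chars.startswith, List.isPrefixOf]

lemma pvHex_eq (v : String) : pvIsHexA v = pvIsHexB v.toList := by
  unfold pvIsHexA pvIsHexB
  simp only [PySem.Str.len_eq, PySem.Str.startswith_eq, PySem.Str.toList_slice,
    PySem.Chars.slice_eq_listSlice, PySem.List.slice_from_one]
  exact pvHexList v.toList

lemma pvValue_eq (rrD : PySem.Dict String String) (key : String) :
    (let aliases := PySem.Dict.mk [("i3.focused_border", "ui.focus.focused_border"), ("i3.unfocused_border", "ui.focus.unfocused_border"), ("i3.focused_inactive_border", "ui.focus.inactive_border")]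
     let value0 := rrD.get? key
     (if value0 == none || value0 == some "" then
        match aliases.get? key with
        | some al => if al == "" then value0 else rrD.get? al
        | none => value0
      else value0)
     = (if (value0 == none || value0 == some "") && aliases.contains key then rrD.get? (aliases.getD key "") else value0)) := by
  have hE : ∀ k : String, (PySem.Dict.mk ([] : List (String × String))).get? k = none := by
    intro k; simp [PySem.Dict.get?]
  by_cases h1 : "i3.focused_border" = key <;> by_cases h2 : "i3.unfocused_border" = key <;>
    by_cases h3 : "i3.focused_inactive_border" = key <;>
    first
    | (simp_all [PySem.Dict.get?_mk_cons, PySem.Dict.contains_mk, PySem.Dict.getD_eq_get?_getD]; done)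
    | (simp_all [PySem.Dict.get?_mk_cons, PySem.Dict.contains_mk, PySem.Dict.getD_eq_get?_getD, hE]; done)

lemma pvMain (resolved_roles colors : List (String × String)) :
    ∀ (fuel : Nat) (key : String) (d : Int), (17 - d).toNat < fuel →
      resolve_role_hex key resolved_roles colors d = pvLoopB resolved_roles colors fuel key d := by
  intro fuel
  induction fuel with
  | zero => intro key d h; omega
  | succ fuel ih =>
    intro key d h
    rw [resolve_role_hex]
    simp only [pvLoopB]
    by_cases hd : d > 16
    · simp [hd]
    · simp only [hd, if_false]
      rw [pvValue_eq (PySem.Dict.mk resolved_roles) key]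
      cases hv1 : (if ((PySem.Dict.mk resolved_roles).get? key == none || (PySem.Dict.mk resolved_roles).get? key == some "") && (PySem.Dict.mk [("i3.focused_border", "ui.focus.focused_border"), ("i3.unfocused_border", "ui.focus.unfocused_border"), ("i3.focused_inactive_border", "ui.focus.inactive_border")]).contains key then (PySem.Dict.mk resolved_roles).get? ((PySem.Dict.mk [("i3.focused_border", "ui.focus.focused_border"), ("i3.unfocused_border", "ui.focus.unfocused_border"), ("i3.focused_inactive_border", "ui.focus.inactive_border")]).getD key "") else (PySem.Dict.mk resolved_roles).get? key) with
      | none => rfl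
      | some v =>
        by_cases hve : v = ""
        · simp [hve]
        · simp only [hve, beq_iff_eq, if_false]
          rw [pvHex_eq]
          by_cases hhex : pvIsHexB v.toList = true
          · simp [hhex]
          · simp only [hhex, Bool.false_eq_true, if_false]
            rw [PySem.Dict.contains_eq_isSome_get?]
            cases hc : (PySem.Dict.mk colors).get? v with
            | some c => simp
            | none =>
              simp only [Option.isSome_none, Bool.false_eq_true, if_false]
              by_cases hrr : (PySem.Dict.mk resolved_roles).contains v = true
              · simp only [hrr, if_true]
                exact ih v (d + 1) (by omega)
              · simp [hrr]

-- ===== VERDICT (by name: the statement is the Claim_ definition above) =====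
theorem resolve_role_hex_spec : Claim_equal_resolve_role_hex := by
  intro role_key rr colors depth _
  unfold Spec_resolve_role_hex resolve_role_hex_alt
  exact pvMain rr colors _ role_key depth (by omega)
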